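-- pv_equiv track=rewrite | github.com/pravhub/Coding-Interviews | lc2113.py | elementInNums
-- ===== SOURCE A (Python) =====
-- from typing import List
--
-- def elementInNums(nums: List[int], queries: List[List[int]]) -> List[int]:
--     n = len(nums)
--     ans = []
--     for time,idx in queries:
--         time = time % (2*n) if time >= (2*n) else time
--         if time == n:
--             ans.append(-1)
--         elif time < n:
--             if(time + idx < n):
--                 ans.append(nums[time+idx])
--             else:
--                 ans.append(-1)
--         else:
--             time = time - n
--             if(idx < time):
--                 ans.append(nums[idx])
--             else:
--                 ans.append(-1)
--     return ans
-- ===== SOURCE B (Python) =====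
-- from typing import List
--
-- def elementInNums(nums: List[int], queries: List[List[int]]) -> List[int]:
--     n = len(nums)
--     # precompute the array's state at every step of the 2n-step cycle
--     states = [nums[t:] for t in range(n)] + [[]] + [nums[:t] for t in range(1, n)]
--     out = []
--     for time, idx in queries:
--         t = time % (2 * n) if time >= 2 * n else time
--         row = states[t]
--         out.append(row[idx] if 0 <= idx < len(row) else -1)
--     return out
-- ===== Notes on version B (the rewrite author's own statement) =====
-- stated objective: alternative
-- what changed: B precomputes the array's state at each of the 2n cycle steps (suffixes, empty, prefixes) and answers every query by one uniform bounds-checked lookup in states[t], replacing A's three-way per-query index arithmetic.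
-- outside the precondition, e.g. on elementInNums([1, 2, 3], [[0, -1]]): A returns [3], B returns [-1]; on elementInNums([1, 2, 3], [[-1, 2]]): A returns [2], B returns [-1]
import Mathlib
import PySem

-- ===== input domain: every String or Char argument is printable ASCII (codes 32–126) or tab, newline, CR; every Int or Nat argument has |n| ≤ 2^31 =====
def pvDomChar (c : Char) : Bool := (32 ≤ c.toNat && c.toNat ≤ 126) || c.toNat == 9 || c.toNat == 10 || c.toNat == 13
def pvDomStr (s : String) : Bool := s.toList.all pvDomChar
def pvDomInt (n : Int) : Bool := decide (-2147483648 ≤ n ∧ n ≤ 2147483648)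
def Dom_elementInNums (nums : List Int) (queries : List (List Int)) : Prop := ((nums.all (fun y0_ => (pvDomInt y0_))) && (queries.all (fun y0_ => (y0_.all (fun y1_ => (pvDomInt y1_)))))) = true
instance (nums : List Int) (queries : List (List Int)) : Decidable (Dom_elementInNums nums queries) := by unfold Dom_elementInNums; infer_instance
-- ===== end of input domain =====

-- B replaces A's three-way per-query index arithmetic by precomputing the 2n cycle
-- states (suffixes, empty, prefixes) and answering each query with one uniform
-- bounds-checked lookup (objective: alternative decomposition, not faster).

-- ===== PORT A =====
-- A's loop body: 'nums[time+idx]' would raise IndexError only outside Pre_ (pyGet? = none,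
-- defaulted, unreached inside Pre_); a query not of length 2 raises ValueError in Python
-- (excluded by Pre_; the port skips it).
def pvStepA (nums : List Int) (ans : List Int) (q : List Int) : List Int :=
  let n : Int := nums.length
  match q with
  | [time, idx] =>
    let time := if time ≥ 2 * n then PySem.Int.mod time (2 * n) else time
    if time = n then ans ++ [-1]
    else if time < n then
      (if time + idx < n then ans ++ [(PySem.List.pyGet? nums (time + idx)).getD 0]
       else ans ++ [-1])
    else
      let time := time - n
      (if idx < time then ans ++ [(PySem.List.pyGet? nums idx).getD 0]
       else ans ++ [-1])
  | _ => ans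

def elementInNums (nums : List Int) (queries : List (List Int)) : List Int :=
  queries.foldl (pvStepA nums) []

-- ===== PORT B =====
-- the state table: nums[t:] = drop t and nums[:t] = take t (exact for the range's values, all ≥ 0)
def pvStates (nums : List Int) : List (List Int) :=
  (List.range nums.length).map (fun t => nums.drop t) ++
    ([[]] ++ (List.range' 1 (nums.length - 1)).map (fun t => nums.take t))

-- B's loop body: uniform bounds-checked lookup in the precomputed state
def pvStepB (nums : List Int) (out : List Int) (q : List Int) : List Int :=
  let n := nums.length
  match q with
  | [time, idx] =>
    let t : Int := if time ≥ 2 * (n : Int) then PySem.Int.mod time (2 * n) else time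
    let row := PySem.List.pyGetD (pvStates nums) t []
    out ++ [if 0 ≤ idx ∧ idx < (row.length : Int) then row.getD idx.toNat 0 else -1]
  | _ => out

def elementInNums_alt (nums : List Int) (queries : List (List Int)) : List Int :=
  queries.foldl (pvStepB nums) []

-- ===== PRECONDITION & SPEC =====
-- Pre_ excludes queries not of length exactly 2 and a nonempty query list with empty nums
-- (A raises ValueError / ZeroDivisionError / IndexError there), and queries with a negative
-- time or idx, where A's and B's negative-index handling are both accidental artefacts
-- (A wraps around nums, B bounds-checks the bucket) and no specification covers either value.
def Pre_elementInNums (nums : List Int) (queries : List (List Int)) : Prop :=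
  (queries = [] ∨ nums ≠ []) ∧
  ∀ q ∈ queries, q.length = 2 ∧ 0 ≤ q.getD 0 0 ∧ 0 ≤ q.getD 1 0
instance (nums : List Int) (queries : List (List Int)) : Decidable (Pre_elementInNums nums queries) := by unfold Pre_elementInNums; infer_instance

def pvWitness_elementInNums : List Int × List (List Int) :=
  ([1, 2, 3], [[0, 1], [3, 0], [4, 0], [5, 1], [13, 2]])

def Spec_elementInNums (nums : List Int) (queries : List (List Int)) (out : List Int) : Prop := out = elementInNums_alt nums queries
instance (nums : List Int) (queries : List (List Int)) (out : List Int) : Decidable (Spec_elementInNums nums queries out) := by unfold Spec_elementInNums; infer_instance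

-- ===== CLAIM (what is proved, stated in full; the proofs are below) =====
def Claim_equal_elementInNums : Prop := ∀ (nums : List Int) (queries : List (List Int)), Dom_elementInNums nums queries → Pre_elementInNums nums queries → Spec_elementInNums nums queries (elementInNums nums queries)

-- ===== LEMMAS AND PROOFS =====

lemma pvStates_getD_lt (nums : List Int) (k : Nat) (hk : k < nums.length) :
    (pvStates nums).getD k [] = nums.drop k := by
  unfold pvStates
  rw [List.getD_eq_getElem?_getD, List.getElem?_append_left (by simp [hk])]
  simp [hk]

lemma pvStates_getD_eq (nums : List Int) :
    (pvStates nums).getD nums.length [] = [] := by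
  unfold pvStates
  rw [List.getD_eq_getElem?_getD,
    List.getElem?_append_right (by simp), List.length_map, List.length_range]
  simp

lemma pvStates_getD_gt (nums : List Int) (k : Nat) (h1 : nums.length < k)
    (h2 : k < 2 * nums.length) :
    (pvStates nums).getD k [] = nums.take (k - nums.length) := by
  unfold pvStates
  rw [List.getD_eq_getElem?_getD,
    List.getElem?_append_right (by simp; omega), List.length_map, List.length_range]
  rw [show (k - nums.length : Nat) = (k - nums.length - 1) + 1 from by omega]
  rw [List.getElem?_append_right (by simp)]
  simp only [List.length_singleton, Nat.add_sub_cancel]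
  rw [List.getElem?_map, List.getElem?_range' (by omega)]
  simp
  congr 1
  omega

-- A's and B's loop bodies agree on a well-formed query
lemma step_agree (nums : List Int) (acc : List Int) (time idx : Int) (hn : nums ≠ [])
    (ht : 0 ≤ time) (hi : 0 ≤ idx) :
    pvStepA nums acc [time, idx] = pvStepB nums acc [time, idx] := by
  have hlen : 0 < nums.length := List.length_pos_iff.mpr hn
  unfold pvStepA pvStepB
  simp only
  set n : Int := (nums.length : Int) with hnd
  have hn0 : 0 < 2 * n := by positivity
  set t : Int := if time ≥ 2 * n then PySem.Int.mod time (2 * n) else time with htd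
  have ht0 : 0 ≤ t := by
    rw [htd]; split
    · exact PySem.Int.mod_nonneg _ hn0
    · exact ht
  have ht2 : t < 2 * n := by
    rw [htd]; split
    · exact PySem.Int.mod_lt _ hn0
    · omega
  have hrow_eq : PySem.List.pyGetD (pvStates nums) t [] = (pvStates nums).getD t.toNat [] := by
    have : t = ((t.toNat : Nat) : Int) := by omega
    rw [this, PySem.List.pyGetD_natCast, Int.toNat_natCast]
  rw [hrow_eq]
  by_cases he : t = n
  · rw [if_pos he, he]
    have hnn : (n.toNat : Nat) = nums.length := by omega
    rw [hnn, pvStates_getD_eq]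
    simp
  · rw [if_neg he]
    by_cases hlt : t < n
    · rw [if_pos hlt]
      have hk : t.toNat < nums.length := by omega
      rw [pvStates_getD_lt nums t.toNat hk]
      have hrow : (((nums.drop t.toNat).length : Nat) : Int) = n - t := by
        rw [List.length_drop]; omega
      by_cases hin : t + idx < n
      · rw [if_pos hin, if_pos ⟨hi, by omega⟩]
        congr 1
        rw [PySem.List.pyGet?_of_nonneg _ (by omega)]
        rw [List.getD_eq_getElem?_getD, List.getElem?_drop]
        rw [show t.toNat + idx.toNat = (t + idx).toNat from by omega]
      · rw [if_neg hin, if_neg (by rw [hrow]; omega)]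
    · rw [if_neg hlt]
      have hk1 : nums.length < t.toNat := by omega
      have hk2 : t.toNat < 2 * nums.length := by omega
      rw [pvStates_getD_gt nums t.toNat hk1 hk2]
      have hrow : (((nums.take (t.toNat - nums.length)).length : Nat) : Int) = t - n := by
        rw [List.length_take]; omega
      by_cases hin : idx < t - n
      · rw [if_pos hin, if_pos ⟨hi, by omega⟩]
        congr 1
        rw [PySem.List.pyGet?_of_nonneg _ hi]
        rw [List.getD_eq_getElem?_getD, List.getElem?_take]
        rw [if_pos (show idx.toNat < t.toNat - nums.length from by omega)]
      · rw [if_neg hin, if_neg (by rw [hrow]; omega)]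

-- both folds agree on well-formed query lists, for any shared accumulator
lemma fold_agree (nums : List Int) (hn : nums ≠ []) :
    ∀ (qs : List (List Int)) (acc : List Int),
      (∀ q ∈ qs, q.length = 2 ∧ 0 ≤ q.getD 0 0 ∧ 0 ≤ q.getD 1 0) →
      qs.foldl (pvStepA nums) acc = qs.foldl (pvStepB nums) acc := by
  intro qs
  induction qs with
  | nil => intro acc _; rfl
  | cons q qs ih =>
    intro acc hq
    obtain ⟨hlen2, h0, h1⟩ := hq q List.mem_cons_self
    match q, hlen2 with
    | [time, idx], _ =>
      simp only [List.getD_eq_getElem?_getD, List.getElem?_cons_zero,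
        List.getElem?_cons_succ, Option.getD_some] at h0 h1
      simp only [List.foldl_cons]
      rw [step_agree nums acc time idx hn h0 h1]
      exact ih _ (fun r hr => hq r (List.mem_cons_of_mem _ hr))

-- ===== VERDICT (by name: the statement is the Claim_ definition above) =====
theorem elementInNums_spec : Claim_equal_elementInNums := by
  intro nums queries _ hpre
  unfold Spec_elementInNums elementInNums elementInNums_alt
  rcases hpre with ⟨hne, hq⟩
  rcases hne with rfl | hn
  · rfl
  · exact fold_agree nums hn queries [] hq
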